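-- pv_equiv track=rewrite | github.com/1747933957/vidgear | ns3/sender.py | _build_schedule
-- ===== SOURCE A (Python) =====
-- from typing import List, Tuple, Dict
--
-- def _build_schedule(budget_total: int, L: int) -> List[int]:
--     """
--     均匀分配，最后一轮收尾（与 C++ BuildSchedule(Uniform) 同语义）。
--     """
--     if budget_total <= 0 or L <= 0:
--         return []
--     eff_L = max(1, L)
--     avg = budget_total // eff_L
--     MIN_BYTES = 50
--     sched = []
--     given = 0
--     for k in range(eff_L):
--         alloc = max(avg, MIN_BYTES)
--         if k == eff_L - 1:
--             alloc = max(0, budget_total - given)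
--         sched.append(alloc)
--         given += alloc
--     return sched
-- ===== SOURCE B (Python) =====
-- def _build_schedule(budget_total: int, L: int):
--     if budget_total <= 0 or L <= 0:
--         return []
--     v = max(budget_total // L, 50)
--
--     def cum(k):
--         # total bytes scheduled after the first k slots: k*v for k < L,
--         # topped up to cover the whole budget once all L slots are done
--         return max(budget_total, (L - 1) * v) if k == L else k * v
--
--     # each slot gets the increment of the cumulative allocation
--     return [cum(k + 1) - cum(k) for k in range(L)]
-- ===== Notes on version B (the rewrite author's own statement) =====
-- stated objective: alternative
-- what changed: Replaces A's stateful loop (running `given` accumulator with a last-index override) by a stateless formulation: define the cumulative allocation function cum(k) in closed form and emit each slot as the difference cum(k+1)-cum(k), so no running sum or mutable schedule is maintained.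
import Mathlib
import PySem

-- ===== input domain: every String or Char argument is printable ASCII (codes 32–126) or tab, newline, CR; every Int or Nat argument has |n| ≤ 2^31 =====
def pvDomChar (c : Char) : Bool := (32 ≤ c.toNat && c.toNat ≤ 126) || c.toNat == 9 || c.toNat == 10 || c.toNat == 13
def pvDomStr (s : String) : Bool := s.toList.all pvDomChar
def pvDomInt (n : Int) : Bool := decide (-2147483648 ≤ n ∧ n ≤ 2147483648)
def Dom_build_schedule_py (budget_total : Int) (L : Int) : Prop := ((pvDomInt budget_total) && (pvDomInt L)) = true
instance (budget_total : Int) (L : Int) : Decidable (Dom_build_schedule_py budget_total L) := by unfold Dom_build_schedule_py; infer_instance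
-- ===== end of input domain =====

-- B replaces A's stateful accumulator loop by a stateless one: each slot is the increment
-- cum(k+1) - cum(k) of a closed-form cumulative allocation function (objective: alternative).

-- ===== PORT A =====
-- literal transliteration: loop over range(eff_L) carrying (sched, given)
def build_schedule_py (budget_total : Int) (L : Int) : List Int :=
  if budget_total ≤ 0 ∨ L ≤ 0 then []
  else
    let effL := max 1 L
    let avg := PySem.Int.floordiv budget_total effL
    let res := (PySem.List.pyRange 0 effL 1).foldl
      (fun (st : List Int × Int) k =>
        let alloc := max avg 50
        let alloc := if k = effL - 1 then max 0 (budget_total - st.2) else alloc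
        (st.1 ++ [alloc], st.2 + alloc)) ([], 0)
    res.1

-- ===== PORT B =====
-- cum k = total bytes scheduled after the first k slots (Source B's inner `cum`)
def pvCum (budget_total L v k : Int) : Int :=
  if k = L then max budget_total ((L - 1) * v) else k * v

def build_schedule_py_alt (budget_total : Int) (L : Int) : List Int :=
  if budget_total ≤ 0 ∨ L ≤ 0 then []
  else
    let v := max (PySem.Int.floordiv budget_total L) 50
    (PySem.List.pyRange 0 L 1).map
      (fun k => pvCum budget_total L v (k + 1) - pvCum budget_total L v k)

-- ===== PRECONDITION & SPEC =====
def Spec_build_schedule_py (budget_total : Int) (L : Int) (out : List Int) : Prop := out = build_schedule_py_alt budget_total L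
instance (budget_total : Int) (L : Int) (out : List Int) : Decidable (Spec_build_schedule_py budget_total L out) := by unfold Spec_build_schedule_py; infer_instance

-- ===== CLAIM (what is proved, stated in full; the proofs are below) =====
def Claim_equal_build_schedule_py : Prop := ∀ (budget_total : Int) (L : Int), Dom_build_schedule_py budget_total L → Spec_build_schedule_py budget_total L (build_schedule_py budget_total L)

-- ===== LEMMAS AND PROOFS =====

-- A's fold over the first m indices (m ≤ effL - 1) appends the uniform value m times
theorem pv_loop_prefix (bt avg effL : Int) (m : Nat) (hm : (m : Int) ≤ effL - 1) :
    (PySem.List.pyRange 0 m 1).foldl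
      (fun (st : List Int × Int) k =>
        let alloc := max avg 50
        let alloc := if k = effL - 1 then max 0 (bt - st.2) else alloc
        (st.1 ++ [alloc], st.2 + alloc)) ([], 0)
    = (List.replicate m (max avg 50), m * max avg 50) := by
  induction m with
  | zero => simp [PySem.List.pyRange_one_eq_nil]
  | succ n ih =>
    have h0 : (0 : Int) ≤ (n : Int) := Int.natCast_nonneg n
    have hr : PySem.List.pyRange 0 ((n : Int) + 1) 1
        = PySem.List.pyRange 0 (n : Int) 1 ++ [(n : Int)] := by
      simpa using PySem.List.pyRange_one_succ_right h0
    have hcast : ((n + 1 : Nat) : Int) = (n : Int) + 1 := by push_cast; ring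
    have hle : (n : Int) ≤ effL - 1 := by omega
    rw [hcast, hr, List.foldl_append, ih hle]
    have hne : (n : Int) ≠ effL - 1 := by omega
    simp only [List.foldl, if_neg hne, List.replicate_succ', Prod.mk.injEq]
    refine ⟨trivial, by push_cast; ring⟩

-- B's map over the first L-1 indices is the same replicate
theorem pv_map_prefix (bt L v : Int) (hL : 1 ≤ L) :
    (PySem.List.pyRange 0 (L - 1) 1).map
      (fun k => pvCum bt L v (k + 1) - pvCum bt L v k)
    = List.replicate (L - 1).toNat v := by
  apply List.ext_getElem
  · simp [PySem.List.length_pyRange_one]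
  · intro k hk _
    have hlen : (PySem.List.pyRange 0 (L - 1) 1).length = (L - 1).toNat := by
      simpa using PySem.List.length_pyRange_one 0 (L - 1)
    rw [List.length_map, hlen] at hk
    simp only [List.getElem_map, PySem.List.getElem_pyRange_one, List.getElem_replicate]
    have hkI : (0 : Int) + (k : Int) < L - 1 := by omega
    unfold pvCum
    have h1 : (0 : Int) + (k : Int) + 1 ≠ L := by omega
    have h2 : (0 : Int) + (k : Int) ≠ L := by omega
    rw [if_neg h1, if_neg h2]
    ring

theorem build_schedule_eq (bt L : Int) :
    build_schedule_py bt L = build_schedule_py_alt bt L := by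
  unfold build_schedule_py build_schedule_py_alt
  split_ifs with h
  · rfl
  · push_neg at h
    obtain ⟨hbt, hL⟩ := h
    have heff : max 1 L = L := by omega
    simp only [heff]
    set v := max (PySem.Int.floordiv bt L) 50 with hv
    have hL1 : (0 : Int) ≤ L - 1 := by omega
    have hcast : ((L - 1).toNat : Int) = L - 1 := Int.toNat_of_nonneg hL1
    have hr : PySem.List.pyRange 0 L 1
        = PySem.List.pyRange 0 (L - 1) 1 ++ [L - 1] := by
      have := PySem.List.pyRange_one_succ_right hL1
      simpa using this
    rw [hr, List.foldl_append, List.map_append]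
    have hle : (((L - 1).toNat : Int)) ≤ L - 1 := le_of_eq hcast
    have hpre := pv_loop_prefix bt (PySem.Int.floordiv bt L) L (L - 1).toNat hle
    rw [hcast] at hpre
    rw [hpre, pv_map_prefix bt L v hL]
    simp only [List.foldl, List.map]
    have hlast : pvCum bt L v (L - 1 + 1) - pvCum bt L v (L - 1)
        = max 0 (bt - (L - 1) * v) := by
      unfold pvCum
      have h1 : L - 1 + 1 = L := by ring
      have h2 : L - 1 ≠ L := by omega
      rw [if_pos h1, if_neg h2]
      rcases le_total bt ((L - 1) * v) with hc | hc
      · rw [max_eq_right hc, max_eq_left (by omega)]; ring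
      · rw [max_eq_left hc, max_eq_right (by omega)]
    rw [hlast] at *
    simp only [← hv, if_true]

-- ===== VERDICT (by name: the statement is the Claim_ definition above) =====
theorem build_schedule_py_spec : Claim_equal_build_schedule_py := by
  intro bt L _
  exact build_schedule_eq bt L
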